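-- pv_equiv track=rewrite | github.com/mossprescott/pynand | nand/solutions/solved_12.py | generate_switch
-- ===== SOURCE A (Python) =====
-- def generate_switch(var, bits, content):
--     """Generate a giant nested Jack if/else matching each possible value
--     from 0 to 127, with bodies from the provided map.
--     """
--     def indent(lines):
--         return ["    " + l for l in lines]
--
--     def gen(b, x):
--         if b == 0:
--             return content.get(x, [])
--         else:
--             cond = f"if ({var} & {1 << (b-1)})"
--             true_body = gen(b-1, 2*x + 1)
--             false_body = gen(b-1, 2*x)
--
--             if true_body == [] and false_body == []:
--                 return []
--             else:
--                 if len(true_body) > 1: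
--                     true_lines = [cond + "{"] + indent(true_body) + ["}"]
--                 else:
--                     true_lines = [f"{cond} {{ {' '.join(true_body)} }}"]
--                 if len(false_body) == 0:
--                     false_lines = []
--                 elif len(false_body) > 1:
--                     false_lines = ["else {"] + indent(false_body) + ["}"]
--                 else:
--                     false_lines = [f"else {{       {' '.join(false_body)} }}"]
--                 return true_lines + false_lines
--
--     return gen(bits, 0)
-- ===== SOURCE B (Python) =====
-- def generate_switch(var, bits, content):
--     """Generate a giant nested Jack if/else matching each possible value
--     from 0 to 127, with bodies from the provided map.
--
--     Bottom-up iterative DP: start from the 2**bits leaves and repeatedly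
--     merge adjacent pairs, instead of top-down recursion.
--     """
--     def indent(lines):
--         return ["    " + l for l in lines]
--
--     def emit(cond, true_body, false_body):
--         if true_body == [] and false_body == []:
--             return []
--         if len(true_body) > 1:
--             true_lines = [cond + "{"] + indent(true_body) + ["}"]
--         else:
--             true_lines = [f"{cond} {{ {' '.join(true_body)} }}"]
--         if len(false_body) == 0:
--             false_lines = []
--         elif len(false_body) > 1:
--             false_lines = ["else {"] + indent(false_body) + ["}"]
--         else:
--             false_lines = [f"else {{       {' '.join(false_body)} }}"]
--         return true_lines + false_lines
--
--     level = [content.get(x, []) for x in range(2 ** bits)]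
--     for bm1 in range(bits):
--         cond = f"if ({var} & {1 << bm1})"
--         level = [emit(cond, level[2 * x + 1], level[2 * x])
--                  for x in range(len(level) // 2)]
--     return level[0]
-- ===== Notes on version B (the rewrite author's own statement) =====
-- stated objective: alternative
-- what changed: Replaces the top-down recursive gen(b,x) with a bottom-up iterative DP: a list of the 2**bits leaf bodies is built once, then repeatedly halved by merging adjacent pairs, with identical formatting logic per merge.
import Mathlib
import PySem

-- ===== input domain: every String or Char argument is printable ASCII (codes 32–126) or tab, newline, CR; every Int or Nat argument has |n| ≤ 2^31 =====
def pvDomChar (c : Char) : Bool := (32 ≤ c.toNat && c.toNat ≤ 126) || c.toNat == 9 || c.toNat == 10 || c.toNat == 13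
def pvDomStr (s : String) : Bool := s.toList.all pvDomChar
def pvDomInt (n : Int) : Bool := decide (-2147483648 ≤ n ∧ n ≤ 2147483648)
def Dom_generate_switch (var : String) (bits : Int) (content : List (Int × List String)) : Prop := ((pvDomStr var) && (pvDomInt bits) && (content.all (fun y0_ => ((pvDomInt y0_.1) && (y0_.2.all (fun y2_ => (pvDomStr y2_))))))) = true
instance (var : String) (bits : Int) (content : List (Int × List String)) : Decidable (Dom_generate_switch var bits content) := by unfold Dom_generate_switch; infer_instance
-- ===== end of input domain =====

-- B is an 'alternative' re-implementation: bottom-up iterative DP over levels of bodies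
-- instead of A's top-down recursion; same cost, identical output.

-- shared dict lookup: Python's content.get(x, []) on the association list (first match)
def pvGet (content : List (Int × List String)) (x : Int) : List String :=
  (content.lookup x).getD []

-- ===== PORT A =====
-- indent(lines) = ["    " + l for l in lines]
def pvIndentA (lines : List String) : List String := lines.map (fun l => "    " ++ l)

-- gen(b, x); the Int parameter b is passed as a Nat (Pre_ requires 0 ≤ bits; for b < 0
-- Python's gen recurses forever and raises RecursionError).  1 << (b-1) is 2^(b-1).
def pvGenA (var : String) (content : List (Int × List String)) : Nat → Int → List String
  | 0, x => pvGet content x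
  | b + 1, x =>
    let cond := "if (" ++ var ++ " & " ++ PySem.Int.toStr ((2 : Int) ^ b) ++ ")"
    let true_body := pvGenA var content b (2 * x + 1)
    let false_body := pvGenA var content b (2 * x)
    if true_body = [] ∧ false_body = [] then []
    else
      let true_lines :=
        if true_body.length > 1 then [cond ++ "{"] ++ pvIndentA true_body ++ ["}"]
        else [cond ++ " { " ++ PySem.Str.join " " true_body ++ " }"]
      let false_lines :=
        if false_body.length = 0 then []
        else if false_body.length > 1 then ["else {"] ++ pvIndentA false_body ++ ["}"]
        else ["else {       " ++ PySem.Str.join " " false_body ++ " }"]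
      true_lines ++ false_lines

def generate_switch (var : String) (bits : Int) (content : List (Int × List String)) : List String :=
  pvGenA var content bits.toNat 0

-- ===== PORT B =====
def pvIndentB (lines : List String) : List String := lines.map (fun l => "    " ++ l)

-- emit(cond, true_body, false_body) of Source B
def pvEmit (cond : String) (true_body false_body : List String) : List String :=
  if true_body = [] ∧ false_body = [] then []
  else
    let true_lines :=
      if true_body.length > 1 then [cond ++ "{"] ++ pvIndentB true_body ++ ["}"]
      else [cond ++ " { " ++ PySem.Str.join " " true_body ++ " }"]
    let false_lines :=
      if false_body.length = 0 then []
      else if false_body.length > 1 then ["else {"] ++ pvIndentB false_body ++ ["}"]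
      else ["else {       " ++ PySem.Str.join " " false_body ++ " }"]
    true_lines ++ false_lines

-- level = [content.get(x, []) for x in range(2**bits)]; for bm1 in range(bits): halve;
-- return level[0].  All list indices (2x+1, 2x < len(level)) are in range, so .getD is
-- exact; the final level always has length 2^(bits-bits) = 1, so level[0] = .getD 0.
def generate_switch_alt (var : String) (bits : Int) (content : List (Int × List String)) : List String :=
  let level0 := (PySem.List.pyRange 0 ((2 : Int) ^ bits.toNat) 1).map (fun x => pvGet content x)
  let final := (List.range bits.toNat).foldl
    (fun level bm1 =>
      let cond := "if (" ++ var ++ " & " ++ PySem.Int.toStr ((2 : Int) ^ bm1) ++ ")"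
      (List.range (level.length / 2)).map
        (fun x => pvEmit cond (level.getD (2 * x + 1) []) (level.getD (2 * x) [])))
    level0
  final.getD 0 []

-- ===== PRECONDITION & SPEC =====
-- Pre_ excludes bits < 0, on which A raises RecursionError (gen never reaches b == 0).
def Pre_generate_switch (var : String) (bits : Int) (content : List (Int × List String)) : Prop :=
  0 ≤ bits
instance (var : String) (bits : Int) (content : List (Int × List String)) : Decidable (Pre_generate_switch var bits content) := by unfold Pre_generate_switch; infer_instance

def pvWitness_generate_switch : String × Int × (List (Int × List String)) :=
  ("v", 2, [(0, ["let y = 0;"]), (3, ["do go();", "return;"])])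

def Spec_generate_switch (var : String) (bits : Int) (content : List (Int × List String)) (out : List String) : Prop := out = generate_switch_alt var bits content
instance (var : String) (bits : Int) (content : List (Int × List String)) (out : List String) : Decidable (Spec_generate_switch var bits content out) := by unfold Spec_generate_switch; infer_instance

-- ===== CLAIM (what is proved, stated in full; the proofs are below) =====
def Claim_equal_generate_switch : Prop := ∀ (var : String) (bits : Int) (content : List (Int × List String)), Dom_generate_switch var bits content → Pre_generate_switch var bits content → Spec_generate_switch var bits content (generate_switch var bits content)

-- ===== LEMMAS AND PROOFS =====

-- one top-down step of A is exactly one merge of B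
lemma pvGenA_succ (var : String) (content : List (Int × List String)) (b : Nat) (x : Int) :
    pvGenA var content (b + 1) x
      = pvEmit ("if (" ++ var ++ " & " ++ PySem.Int.toStr ((2 : Int) ^ b) ++ ")")
          (pvGenA var content b (2 * x + 1)) (pvGenA var content b (2 * x)) := by
  simp [pvGenA, pvEmit, pvIndentA, pvIndentB]

-- the initial level is the leaves gen(0, x), x = 0 .. 2^N - 1
lemma pvLevel0 (content : List (Int × List String)) (N : Nat) :
    (PySem.List.pyRange 0 ((2 : Int) ^ N) 1).map (fun x => pvGet content x)
      = (List.range (2 ^ N)).map (fun i : Nat => pvGet content (i : Int)) := by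
  rw [PySem.List.pyRange_one]
  have h2 : ((2 : Int) ^ N - 0).toNat = 2 ^ N := by
    rw [sub_zero]
    rw [show ((2 : Int) ^ N) = ((2 ^ N : Nat) : Int) by push_cast; ring]
    exact Int.toNat_natCast _
  rw [h2]
  simp

-- loop invariant: after k merge rounds the level holds gen(k, x), x = 0 .. 2^(N-k) - 1
lemma pvLevels (var : String) (content : List (Int × List String)) (N : Nat) :
    ∀ k, k ≤ N →
      (List.range k).foldl
        (fun level bm1 =>
          let cond := "if (" ++ var ++ " & " ++ PySem.Int.toStr ((2 : Int) ^ bm1) ++ ")"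
          (List.range (level.length / 2)).map
            (fun x => pvEmit cond (level.getD (2 * x + 1) []) (level.getD (2 * x) [])))
        ((PySem.List.pyRange 0 ((2 : Int) ^ N) 1).map (fun x => pvGet content x))
      = (List.range (2 ^ (N - k))).map (fun i : Nat => pvGenA var content k (i : Int)) := by
  intro k
  induction k with
  | zero =>
    intro _
    simpa [pvGenA] using pvLevel0 content N
  | succ k ih =>
    intro hk
    rw [List.range_succ, List.foldl_append, ih (by omega)]
    have hpow : 2 ^ (N - k) = 2 * 2 ^ (N - (k + 1)) := by
      have : N - k = (N - (k + 1)) + 1 := by omega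
      rw [this]; ring
    have hdiv : 2 ^ (N - k) / 2 = 2 ^ (N - (k + 1)) := by omega
    simp only [List.foldl_cons, List.foldl_nil, List.length_map, List.length_range, hdiv]
    apply List.map_congr_left
    intro x hx
    have hx' : x < 2 ^ (N - (k + 1)) := List.mem_range.mp hx
    have h1 : 2 * x + 1 < 2 ^ (N - k) := by omega
    have h2 : 2 * x < 2 ^ (N - k) := by omega
    rw [List.getD_eq_getElem _ _ (by simpa using h1), List.getD_eq_getElem _ _ (by simpa using h2)]
    simp only [List.getElem_map, List.getElem_range]
    rw [pvGenA_succ]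
    congr 2

lemma pv_main (var : String) (bits : Int) (content : List (Int × List String)) :
    generate_switch var bits content = generate_switch_alt var bits content := by
  simp only [generate_switch, generate_switch_alt]
  rw [pvLevels var content bits.toNat bits.toNat le_rfl]
  simp

-- ===== VERDICT (by name: the statement is the Claim_ definition above) =====
theorem generate_switch_spec : Claim_equal_generate_switch := by
  intro var bits content _ _
  unfold Spec_generate_switch
  exact pv_main var bits content
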